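-- pv_equiv track=rewrite | github.com/mounikayacham/solvedProblems | Difficulty: Medium/Power Of Numbers/power-of-numbers.py | reverse_exponentiation
-- ===== SOURCE A (Python) =====
-- def reverse_exponentiation(n):
--     # code here
--     a=n
--     r=0
--     while n>0:
--         k=n%10
--         r=r*10+k
--         n=n//10
--     return a**r
-- ===== SOURCE B (Python) =====
-- def reverse_exponentiation(n):
--     r = 0
--     if n > 0:
--         r = sum((ord(c) - 48) * 10 ** i for i, c in enumerate(str(n)))
--     return n ** r
-- ===== Notes on version B (the rewrite author's own statement) =====
-- stated objective: alternative
-- what changed: B replaces A's mod/div Horner digit-reversal loop by a positional-weight sum over the decimal string: the i-th character from the left contributes its digit value times the i-th power of ten, so the reversed exponent is built without any arithmetic division.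
import Mathlib
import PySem

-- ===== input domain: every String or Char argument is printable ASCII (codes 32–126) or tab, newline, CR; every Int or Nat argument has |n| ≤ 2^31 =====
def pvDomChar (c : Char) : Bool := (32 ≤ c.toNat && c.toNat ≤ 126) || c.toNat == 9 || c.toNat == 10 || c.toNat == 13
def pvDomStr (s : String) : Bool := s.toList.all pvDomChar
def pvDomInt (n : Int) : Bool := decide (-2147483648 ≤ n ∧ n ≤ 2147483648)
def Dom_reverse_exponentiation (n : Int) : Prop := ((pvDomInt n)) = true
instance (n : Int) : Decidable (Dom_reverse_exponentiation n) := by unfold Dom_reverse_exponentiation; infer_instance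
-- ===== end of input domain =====

-- B computes the reversed-digit exponent as a positional-weight sum over str(n) instead of A's mod/div loop (alternative decomposition, same cost).


-- ===== PORT A =====
-- the 'while n>0' loop: k=n%10; r=r*10+k; n=n//10
def pvLoopA (n r : Int) : Int :=
  if 0 < n then pvLoopA (PySem.Int.floordiv n 10) (r * 10 + PySem.Int.mod n 10) else r
  termination_by n.toNat
  decreasing_by
    have he : Int.fdiv n 10 = n / 10 := by simp [Int.fdiv_eq_ediv]
    simp only [PySem.Int.floordiv, he]
    omega

-- a**r with the loop's (always nonnegative) exponent r
def reverse_exponentiation (n : Int) : Int :=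
  let a := n
  let r := pvLoopA n 0
  a ^ r.toNat

-- ===== PORT B =====
-- r = sum((ord(c) - 48) * 10**i for i, c in enumerate(str(n))) when n > 0, else 0; return n**r
def reverse_exponentiation_alt (n : Int) : Int :=
  let r : Int :=
    if 0 < n then
      ((PySem.List.enumerate (PySem.Int.toChars n)).foldl
        (fun acc p => acc + ((p.2.toNat : Int) - 48) * 10 ^ p.1.toNat) 0)
    else 0
  n ^ r.toNat

-- ===== PRECONDITION & SPEC =====
def Spec_reverse_exponentiation (n : Int) (out : Int) : Prop := out = reverse_exponentiation_alt n
instance (n : Int) (out : Int) : Decidable (Spec_reverse_exponentiation n out) := by unfold Spec_reverse_exponentiation; infer_instance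

-- ===== CLAIM (what is proved, stated in full; the proofs are below) =====
def Claim_equal_reverse_exponentiation : Prop := ∀ (n : Int), Dom_reverse_exponentiation n → Spec_reverse_exponentiation n (reverse_exponentiation n)

-- ===== LEMMAS AND PROOFS =====

-- value of a char list under B's positional weighting, in Horner (foldr) form
def pvVc : List Char → Int :=
  fun cs => cs.foldr (fun c acc => ((c.toNat : Int) - 48) + 10 * acc) 0

-- Nat mirror of A's loop, used to relate both sides
def pvA' (m : Nat) (a : Int) : Int :=
  if h : m = 0 then a else pvA' (m / 10) ((m % 10 : Nat) + 10 * a)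
  termination_by m
  decreasing_by exact Nat.div_lt_self (Nat.pos_of_ne_zero h) (by norm_num)

theorem pvVc_nil : pvVc [] = 0 := rfl

theorem pvVc_cons (c : Char) (cs : List Char) :
    pvVc (c :: cs) = ((c.toNat : Int) - 48) + 10 * pvVc cs := rfl

-- B's enumerate-fold equals 10^i * pvVc, for any (nonnegative) start index and accumulator
theorem pvFold_eq_Vc (cs : List Char) : ∀ (i : Nat) (acc : Int),
    (PySem.List.enumerate cs (i : Int)).foldl
        (fun acc p => acc + ((p.2.toNat : Int) - 48) * 10 ^ p.1.toNat) acc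
      = acc + 10 ^ i * pvVc cs := by
  induction cs with
  | nil => intro i acc; simp [PySem.List.enumerate, pvVc]
  | cons c cs ih =>
      intro i acc
      rw [PySem.List.enumerate, List.foldl_cons]
      have hcast : ((i : Int) + 1) = ((i + 1 : Nat) : Int) := by push_cast; ring
      rw [hcast, ih (i + 1), pvVc_cons]
      simp only [Int.toNat_natCast]
      ring

theorem pvVc_digitChar_cons (d : Nat) (hd : d < 10) (ds : List Char) :
    pvVc (Nat.digitChar d :: ds) = (d : Int) + 10 * pvVc ds := by
  rw [pvVc_cons]
  interval_cases d <;> norm_num [Nat.digitChar] <;> decide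

-- the core lemma: toDigitsCore is pvA' under pvVc
theorem pvVc_toDigitsCore : ∀ (fuel m : Nat) (ds : List Char), 0 < m → m < fuel →
    pvVc (Nat.toDigitsCore 10 fuel m ds) = pvA' m (pvVc ds) := by
  intro fuel
  induction fuel with
  | zero => intro m ds h1 h2; omega
  | succ fuel ih =>
      intro m ds h1 h2
      rw [Nat.toDigitsCore]
      by_cases h : m / 10 = 0
      · simp only [h, if_true]
        rw [pvVc_digitChar_cons _ (Nat.mod_lt _ (by norm_num)) ds]
        rw [pvA', dif_neg (by omega), h, pvA', dif_pos rfl]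
      · simp only [h, if_false]
        rw [ih (m / 10) _ (Nat.pos_of_ne_zero h) (by
              have := Nat.div_lt_self h1 (show 1 < 10 by norm_num); omega)]
        rw [pvVc_digitChar_cons _ (Nat.mod_lt _ (by norm_num)) ds]
        conv_rhs => rw [pvA', dif_neg (by omega)]

-- A's Int loop is the Nat mirror on casts
theorem pvLoopA_eq_A' : ∀ (m : Nat) (r : Int), pvLoopA (m : Int) r = pvA' m r := by
  intro m
  induction m using Nat.strong_induction_on with
  | _ m ih =>
      intro r
      by_cases h : m = 0
      · subst h
        rw [pvLoopA, if_neg (by norm_num), pvA', dif_pos rfl]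
      · have hm : (0 : Int) < (m : Int) := by exact_mod_cast Nat.pos_of_ne_zero h
        rw [pvLoopA, if_pos hm]
        have hfd : PySem.Int.floordiv (m : Int) 10 = ((m / 10 : Nat) : Int) := by
          simp only [PySem.Int.floordiv, Int.fdiv_eq_ediv]
          omega
        have hmd : PySem.Int.mod (m : Int) 10 = ((m % 10 : Nat) : Int) := by
          simp only [PySem.Int.mod, Int.fmod_eq_emod]
          omega
        rw [hfd, hmd, ih (m / 10) (Nat.div_lt_self (Nat.pos_of_ne_zero h) (by norm_num))]
        conv_rhs => rw [pvA', dif_neg h]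
        ring_nf

-- ===== VERDICT (by name: the statement is the Claim_ definition above) =====
theorem reverse_exponentiation_spec : Claim_equal_reverse_exponentiation := by
  intro n _
  unfold Spec_reverse_exponentiation reverse_exponentiation reverse_exponentiation_alt
  by_cases hn : 0 < n
  · have hcast : ((n.toNat : Int)) = n := Int.toNat_of_nonneg (le_of_lt hn)
    have hm : 0 < n.toNat := by omega
    have hA : pvLoopA n 0 = pvA' n.toNat 0 := by
      conv_lhs => rw [← hcast]
      exact pvLoopA_eq_A' n.toNat 0
    have hchars : PySem.Int.toChars n = Nat.toDigits 10 n.toNat := by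
      simp [PySem.Int.toChars, not_lt.mpr (le_of_lt hn)]
    have hB : ((PySem.List.enumerate (PySem.Int.toChars n)).foldl
        (fun acc p => acc + ((p.2.toNat : Int) - 48) * 10 ^ p.1.toNat) 0) = pvA' n.toNat 0 := by
      have h0 : (0 : Int) = ((0 : Nat) : Int) := rfl
      rw [hchars, Nat.toDigits, h0, pvFold_eq_Vc]
      rw [pvVc_toDigitsCore (n.toNat + 1) n.toNat [] hm (by omega)]
      simp [pvVc_nil]
    simp only [if_pos hn, hA, hB]
  · have h0 : pvLoopA n 0 = 0 := by rw [pvLoopA, if_neg hn]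
    simp [if_neg hn, h0]
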